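-- pv_equiv track=rewrite | github.com/mough/Python-Challenge | Check io/matrices.py | rowing
-- ===== SOURCE A (Python) =====
-- from collections import defaultdict
--
-- def rowing(matrix):
--
--     rows = {}
--
--     for i, row in enumerate(matrix):
--         rows[i] = sum(row)
--
--     drows = defaultdict(set)
--
--     for k, v in rows.items():
--         drows[v].add(k)
--     ddrows = {k: v for k, v in drows.items() if len(v) > 1}
--
--     if min(rows.values()) in ddrows:
--         smallest = min(ddrows.keys())
--         return min(ddrows.get(smallest))
--     else:
--         smallest = min(rows.values())
--         return drows.get(smallest).pop()
-- ===== SOURCE B (Python) =====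
-- def rowing(matrix):
--     sums = [sum(row) for row in matrix]
--     return sums.index(min(sums))
-- ===== Notes on version B (the rewrite author's own statement) =====
-- stated objective: simpler
-- what changed: B replaces A's dict-of-row-sums, defaultdict(set) grouping, duplicate-filtering and tie/no-tie branching with a single argmin: compute the row sums once and return the index of the first minimum, which is exactly A's value (first-index tie-break) in both of A's branches.
import Mathlib
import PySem

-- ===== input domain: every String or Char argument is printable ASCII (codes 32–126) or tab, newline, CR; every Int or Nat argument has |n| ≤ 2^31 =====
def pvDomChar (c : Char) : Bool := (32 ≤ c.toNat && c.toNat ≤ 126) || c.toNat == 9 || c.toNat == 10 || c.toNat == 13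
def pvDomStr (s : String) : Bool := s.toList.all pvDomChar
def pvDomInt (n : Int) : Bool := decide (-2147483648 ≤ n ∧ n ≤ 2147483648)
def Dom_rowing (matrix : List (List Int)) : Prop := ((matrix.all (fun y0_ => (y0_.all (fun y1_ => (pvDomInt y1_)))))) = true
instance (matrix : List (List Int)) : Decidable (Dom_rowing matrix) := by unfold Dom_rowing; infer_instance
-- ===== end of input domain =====

-- B replaces A's dict/defaultdict-set grouping and tie branching by a single first-argmin
-- over the row sums (objective: simpler); equivalent on every non-empty matrix (A raises on []).


-- ===== PORT A =====
-- rows = {}; for i, row in enumerate(matrix): rows[i] = sum(row)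
def pvRows (matrix : List (List Int)) : PySem.Dict Int Int :=
  (PySem.List.enumerate matrix).foldl (fun d p => d.insert p.1 p.2.sum) PySem.Dict.empty

-- drows = defaultdict(set); for k, v in rows.items(): drows[v].add(k)
def pvDrows (matrix : List (List Int)) : PySem.Dict Int (PySem.Set Int) :=
  (pvRows matrix).items.foldl
    (fun d p => d.modify p.2 PySem.Set.empty (fun s => PySem.Set.add s p.1)) PySem.Dict.empty

-- ddrows = {k: v for k, v in drows.items() if len(v) > 1}
def pvDdrows (matrix : List (List Int)) : PySem.Dict Int (PySem.Set Int) :=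
  PySem.Dict.mk ((pvDrows matrix).items.filter (fun p => 1 < p.2.length))

def rowing (matrix : List (List Int)) : Int :=
  match PySem.List.min? (pvRows matrix).values (fun x => x) with
  | none => 0  -- Python: min() raises ValueError on an empty matrix; excluded by Pre_rowing
  | some m =>
    if (pvDdrows matrix).contains m then
      -- smallest = min(ddrows.keys()); return min(ddrows.get(smallest))
      match PySem.List.min? (pvDdrows matrix).keys (fun x => x) with
      | none => 0  -- unreachable: ddrows contains m
      | some smallest =>
        match (pvDdrows matrix).get? smallest with
        | some s => (PySem.List.min? s (fun x => x)).getD 0  -- min over a set: order-independent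
        | none => 0  -- unreachable: smallest ∈ ddrows.keys
    else
      -- smallest = min(rows.values()), i.e. m again; return drows.get(smallest).pop()
      match (pvDrows matrix).get? m with
      | some s =>
        match s with
        | x :: _ => x  -- set.pop(): the set is a singleton here (m occurs once), so exact
        | [] => 0      -- unreachable: m ∈ rows.values
      | none => 0      -- unreachable: m is a key of drows

-- ===== PORT B =====
-- sums = [sum(row) for row in matrix]
def pvSums (matrix : List (List Int)) : List Int := matrix.map List.sum

-- return sums.index(min(sums))
def rowing_alt (matrix : List (List Int)) : Int :=
  match PySem.List.min? (pvSums matrix) (fun x => x) with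
  | none => 0  -- Python: min() raises ValueError on []; excluded by Pre_rowing
  | some m => ((PySem.List.index? (pvSums matrix) m).getD 0 : Int)

-- ===== PRECONDITION & SPEC =====
-- Pre_ excludes only the empty matrix, on which A's min(rows.values()) raises ValueError.
def Pre_rowing (matrix : List (List Int)) : Prop := matrix ≠ []
instance (matrix : List (List Int)) : Decidable (Pre_rowing matrix) := by unfold Pre_rowing; infer_instance
def pvWitness_rowing : List (List Int) := [[1, 2], [3]]
def Spec_rowing (matrix : List (List Int)) (out : Int) : Prop := out = rowing_alt matrix
instance (matrix : List (List Int)) (out : Int) : Decidable (Spec_rowing matrix out) := by unfold Spec_rowing; infer_instance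

-- ===== CLAIM (what is proved, stated in full; the proofs are below) =====
def Claim_equal_rowing : Prop := ∀ (matrix : List (List Int)), Dom_rowing matrix → Pre_rowing matrix → Spec_rowing matrix (rowing matrix)

-- ===== LEMMAS AND PROOFS =====

-- the indices (first components) of the enumerated pairs whose value is c, in order
def pvIdxs (xs : List Int) (s : Int) (c : Int) : List Int :=
  ((PySem.List.enumerate xs s).filter (fun p => p.2 == c)).map (fun p => p.1)

theorem pv_enum_map_sum : ∀ (mat : List (List Int)) (s : Int),
    (PySem.List.enumerate mat s).map (fun p => (p.1, p.2.sum)) =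
      PySem.List.enumerate (mat.map List.sum) s := by
  intro mat
  induction mat with
  | nil => intro s; simp [PySem.List.enumerate_nil]
  | cons r mat ih =>
    intro s
    simp only [List.map_cons, PySem.List.enumerate_cons, List.map]
    exact congrArg _ (ih (s + 1))

theorem pv_enum_fst_nodup {α : Type} (xs : List α) (s : Int) :
    ((PySem.List.enumerate xs s).map (fun p => p.1)).Nodup := by
  have h := PySem.List.pairwise_lt_enumerate xs s
  exact (List.pairwise_map.mpr h).imp (fun hlt => ne_of_lt hlt)

theorem pv_rows_items (matrix : List (List Int)) :
    (pvRows matrix).items = PySem.List.enumerate (matrix.map List.sum) 0 := by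
  unfold pvRows
  rw [PySem.Dict.items_foldl_insert_fresh (PySem.List.enumerate matrix 0)
        (fun p => p.1) (fun p => p.2.sum) PySem.Dict.empty
        (fun a _ => rfl) (pv_enum_fst_nodup matrix 0)]
  rw [pv_enum_map_sum]
  rfl

theorem pv_rows_values (matrix : List (List Int)) :
    (pvRows matrix).values = matrix.map List.sum := by
  show (pvRows matrix).items.map _ = _
  rw [pv_rows_items]
  exact PySem.List.map_snd_enumerate _ _

theorem pv_group_fold : ∀ (l : List (Int × Int)) (d : PySem.Dict Int (PySem.Set Int)),
    ((l.map (fun p => p.1)).Nodup) →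
    (∀ c x, x ∈ d.getD c PySem.Set.empty → ¬ x ∈ l.map (fun p => p.1)) →
    ∀ c, (l.foldl (fun d p => d.modify p.2 PySem.Set.empty (fun s => PySem.Set.add s p.1)) d).getD c PySem.Set.empty
      = d.getD c PySem.Set.empty ++ (l.filter (fun p => p.2 == c)).map (fun p => p.1) := by
  intro l
  induction l with
  | nil => intro d _ _ c; simp
  | cons p l ih =>
    intro d hnd hd c
    obtain ⟨i, v⟩ := p
    simp only [List.map_cons] at hnd hd
    have hni : i ∉ l.map (fun p => p.1) := (List.nodup_cons.mp hnd).1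
    have hnd2 : (l.map (fun p => p.1)).Nodup := (List.nodup_cons.mp hnd).2
    have hadd : ∀ c', (d.modify v PySem.Set.empty (fun s => PySem.Set.add s i)).getD c' PySem.Set.empty
        = d.getD c' PySem.Set.empty ++ (if v = c' then [i] else []) := by
      intro c'
      rw [PySem.Dict.getD_modify]
      by_cases hvc : c' = v
      · subst hvc
        have hmem : i ∉ d.getD c' PySem.Set.empty := fun hm => hd c' i hm (by simp)
        have hmem' : i ∉ d.getD c' [] := hmem
        simp [PySem.Set.add, PySem.Set.contains, hmem']
      · rw [if_neg hvc, if_neg (fun h => hvc h.symm)]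
        simp
    have hd' : ∀ c' x, x ∈ (d.modify v PySem.Set.empty (fun s => PySem.Set.add s i)).getD c' PySem.Set.empty
        → ¬ x ∈ l.map (fun p => p.1) := by
      intro c' x hx
      rw [hadd c'] at hx
      rcases List.mem_append.mp hx with hx | hx
      · exact fun h => hd c' x hx (List.mem_cons.mpr (Or.inr h))
      · by_cases hvc : v = c'
        · rw [if_pos hvc] at hx
          simp at hx
          subst hx
          exact hni
        · rw [if_neg hvc] at hx; simp at hx
    rw [List.foldl_cons, ih _ hnd2 hd' c, hadd c, List.filter_cons]
    by_cases hvc : v = c <;> simp [hvc, List.append_assoc]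

theorem pv_drows_getD (matrix : List (List Int)) (c : Int) :
    (pvDrows matrix).getD c PySem.Set.empty = pvIdxs (matrix.map List.sum) 0 c := by
  unfold pvDrows pvIdxs
  rw [pv_rows_items]
  rw [pv_group_fold (PySem.List.enumerate (matrix.map List.sum) 0) PySem.Dict.empty
        (pv_enum_fst_nodup _ 0) (fun c x hx => absurd hx (by simp [PySem.Dict.getD, PySem.Dict.empty, PySem.Dict.get?])) c]
  simp [PySem.Dict.getD, PySem.Dict.empty, PySem.Dict.get?]

theorem pv_drows_keys (matrix : List (List Int)) :
    (pvDrows matrix).keys = PySem.Set.ofList (matrix.map List.sum) := by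
  unfold pvDrows
  rw [PySem.Dict.keys_foldl_modify_key ((pvRows matrix).items) (fun p => p.2)
        PySem.Set.empty (fun _ p s => PySem.Set.add s p.1) PySem.Dict.empty]
  have h2 : (pvRows matrix).items.map (fun p => p.2) = matrix.map List.sum := by
    rw [pv_rows_items]; exact PySem.List.map_snd_enumerate _ _
  rw [h2]
  simp [PySem.Set.update, PySem.Set.ofList_eq_foldl, PySem.Dict.keys, PySem.Dict.empty]

theorem pv_drows_keys_nodup (matrix : List (List Int)) : (pvDrows matrix).keys.Nodup := by
  rw [pv_drows_keys]; exact PySem.Set.nodup_ofList _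

theorem pv_drows_items (matrix : List (List Int)) :
    (pvDrows matrix).items =
      (PySem.Set.ofList (matrix.map List.sum)).map
        (fun c => (c, pvIdxs (matrix.map List.sum) 0 c)) := by
  rw [PySem.Dict.items_eq_map_keys (pvDrows matrix) (pv_drows_keys_nodup matrix) PySem.Set.empty,
      pv_drows_keys]
  exact List.map_congr_left (fun c _ => by rw [pv_drows_getD])

theorem pv_idxs_length (xs : List Int) (s c : Int) : (pvIdxs xs s c).length = xs.count c := by
  unfold pvIdxs
  rw [List.length_map, ← List.countP_eq_length_filter, List.count_eq_countP]
  conv_rhs => rw [← PySem.List.map_snd_enumerate xs s]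
  rw [List.countP_map]
  rfl

theorem pv_idxs_head : ∀ (xs : List Int) (s c : Int), c ∈ xs →
    ∃ (k : Nat) (t : List Int), PySem.List.index? xs c = some k ∧
      pvIdxs xs s c = (s + (k : Int)) :: t := by
  intro xs
  induction xs with
  | nil => intro s c h; simp at h
  | cons x xs ih =>
    intro s c hc
    by_cases hx : x = c
    · subst hx
      refine ⟨0, pvIdxs xs (s + 1) x, ?_, ?_⟩
      · exact PySem.List.index?_cons_self _ _
      · unfold pvIdxs
        rw [PySem.List.enumerate_cons]
        simp
    · have hc' : c ∈ xs := by
        rcases List.mem_cons.mp hc with h | h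
        · exact absurd h.symm hx
        · exact h
      obtain ⟨k, t, hi, hh⟩ := ih (s + 1) c hc'
      refine ⟨k + 1, t, ?_, ?_⟩
      · rw [PySem.List.index?_cons_of_ne xs hx, hi]; rfl
      · unfold pvIdxs
        rw [PySem.List.enumerate_cons]
        have hxc : (x == c) = false := by simp [hx]
        simp only [List.filter_cons, hxc, Bool.false_eq_true, if_false]
        unfold pvIdxs at hh
        rw [hh]
        congr 1
        push_cast
        ring

theorem pv_idxs_pairwise (xs : List Int) (s c : Int) : (pvIdxs xs s c).Pairwise (· < ·) := by
  unfold pvIdxs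
  exact List.pairwise_map.mpr ((PySem.List.pairwise_lt_enumerate xs s).filter _)

theorem pv_foldl_min_eq : ∀ (t : List Int) (a x : Int), x ∈ a :: t → (∀ y ∈ a :: t, x ≤ y) →
    t.foldl min a = x := by
  intro t
  induction t with
  | nil =>
    intro a x hx _
    simp at hx
    simp [hx]
  | cons b t ih =>
    intro a x hx hle
    have hxa : x ≤ a := hle a (List.mem_cons_self)
    have hxb : x ≤ b := hle b (by simp)
    rw [List.foldl_cons]
    apply ih (min a b) x
    · rcases List.mem_cons.mp hx with rfl | h
      · exact List.mem_cons.mpr (Or.inl (le_antisymm (le_min hxa hxb) (min_le_left _ _)))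
      · rcases List.mem_cons.mp h with rfl | h
        · exact List.mem_cons.mpr (Or.inl (le_antisymm (le_min hxa hxb) (min_le_right _ _)))
        · exact List.mem_cons.mpr (Or.inr h)
    · intro y hy
      rcases List.mem_cons.mp hy with rfl | h
      · exact le_min hxa hxb
      · exact hle y (by simp [h])

theorem pv_min?_eq {l : List Int} {x : Int} (hx : x ∈ l) (hle : ∀ y ∈ l, x ≤ y) :
    PySem.List.min? l (fun y => y) = some x := by
  cases l with
  | nil => simp at hx
  | cons a t =>
    rw [PySem.List.min?_id_cons]
    exact congrArg some (pv_foldl_min_eq t a x hx hle)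

theorem pv_get?_mk {ν : Type} : ∀ (ps : List (Int × ν)) (k : Int) (v : ν),
    ((ps.map (fun p => p.1)).Nodup) → (k, v) ∈ ps →
    (PySem.Dict.mk ps).get? k = some v := by
  intro ps
  induction ps with
  | nil => intro k v _ h; simp at h
  | cons p ps ih =>
    intro k v hnd hm
    obtain ⟨a, b⟩ := p
    rw [PySem.Dict.get?_mk_cons]
    rcases List.mem_cons.mp hm with heq | h
    · rw [Prod.mk.injEq] at heq
      rw [heq.1]
      simp [heq.2]
    · simp only [List.map_cons] at hnd
      have hk : k ∈ ps.map (fun p => p.1) := List.mem_map.mpr ⟨(k, v), h, rfl⟩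
      have hne : ¬ ((a == k) = true) := by
        simp only [beq_iff_eq]
        intro he
        exact (List.nodup_cons.mp hnd).1 (he ▸ hk)
      rw [if_neg hne]
      exact ih k v (List.nodup_cons.mp hnd).2 h

-- ===== VERDICT (by name: the statement is the Claim_ definition above) =====
theorem rowing_spec : Claim_equal_rowing := by
  intro matrix _ hpre
  unfold Spec_rowing rowing rowing_alt
  rw [pv_rows_values]
  have hsums : pvSums matrix = matrix.map List.sum := rfl
  rw [hsums]
  cases hm : PySem.List.min? (matrix.map List.sum) (fun x => x) with
  | none => rfl
  | some m =>
    dsimp only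
    have hmem : m ∈ matrix.map List.sum := PySem.List.min?_mem hm
    have hmin : ∀ y ∈ matrix.map List.sum, m ≤ y := PySem.List.min?_isMin hm
    obtain ⟨k, t, hidx, hhead⟩ := pv_idxs_head (matrix.map List.sum) 0 m hmem
    rw [hidx]
    have hcont : (pvDdrows matrix).contains m = true ↔ 1 < (matrix.map List.sum).count m := by
      unfold pvDdrows
      rw [PySem.Dict.contains_mk, pv_drows_items]
      simp only [List.any_eq_true, List.mem_filter, List.mem_map, beq_iff_eq,
        decide_eq_true_eq]
      constructor
      · rintro ⟨p, ⟨⟨c, hc, rfl⟩, hlen⟩, rfl⟩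
        rwa [pv_idxs_length] at hlen
      · intro h
        exact ⟨(m, pvIdxs (matrix.map List.sum) 0 m),
          ⟨⟨m, (PySem.Set.mem_ofList _ _).mpr hmem, rfl⟩, by rwa [pv_idxs_length]⟩, rfl⟩
    by_cases hdup : 1 < (matrix.map List.sum).count m
    · rw [if_pos (hcont.mpr hdup)]
      have hkeys : (pvDdrows matrix).keys =
          ((PySem.Set.ofList (matrix.map List.sum)).filter
            (fun c => 1 < (pvIdxs (matrix.map List.sum) 0 c).length)) := by
        unfold pvDdrows
        rw [PySem.Dict.keys_mk, pv_drows_items, List.filter_map, List.map_map]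
        simp [Function.comp_def]
      have hmk : m ∈ (pvDdrows matrix).keys := by
        rw [hkeys]
        refine List.mem_filter.mpr ⟨(PySem.Set.mem_ofList _ _).mpr hmem, ?_⟩
        simp [pv_idxs_length, hdup]
      have hsm : PySem.List.min? (pvDdrows matrix).keys (fun x => x) = some m := by
        apply pv_min?_eq hmk
        intro y hy
        rw [hkeys] at hy
        exact hmin y ((PySem.Set.mem_ofList _ _).mp (List.mem_filter.mp hy).1)
      simp only [hsm]
      have hget : (pvDdrows matrix).get? m = some (pvIdxs (matrix.map List.sum) 0 m) := by
        unfold pvDdrows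
        apply pv_get?_mk
        · have : ((pvDrows matrix).items.filter (fun p => 1 < p.2.length)).map (fun p => p.1) =
              (pvDdrows matrix).keys := by
            unfold pvDdrows
            rw [PySem.Dict.keys_mk]
          rw [this, hkeys]
          exact (PySem.Set.nodup_ofList _).filter _
        · rw [pv_drows_items]
          refine List.mem_filter.mpr ⟨List.mem_map.mpr ⟨m, (PySem.Set.mem_ofList _ _).mpr hmem, rfl⟩, ?_⟩
          simp [pv_idxs_length, hdup]
      simp only [hget]
      have hpw := pv_idxs_pairwise (matrix.map List.sum) 0 m
      rw [hhead] at hpw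
      have hminidx : PySem.List.min? ((0 + (k : Int)) :: t) (fun x => x) = some (0 + (k : Int)) := by
        apply pv_min?_eq (List.mem_cons_self)
        intro y hy
        rcases List.mem_cons.mp hy with rfl | h
        · exact le_refl _
        · exact le_of_lt ((List.pairwise_cons.mp hpw).1 y h)
      rw [hhead, hminidx]
      simp
    · rw [if_neg (fun h => hdup (hcont.mp h))]
      have hc1 : (matrix.map List.sum).count m = 1 := by
        have := List.count_pos_iff.mpr hmem
        omega
      have hlen : (pvIdxs (matrix.map List.sum) 0 m).length = 1 := by
        rw [pv_idxs_length, hc1]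
      have ht : t = [] := by
        rw [hhead] at hlen
        simpa using hlen
      have hgd := pv_drows_getD matrix m
      cases hq : (pvDrows matrix).get? m with
      | none =>
        exfalso
        rw [PySem.Dict.getD, hq] at hgd
        rw [hhead] at hgd
        simp [PySem.Set.empty] at hgd
      | some s =>
        rw [PySem.Dict.getD, hq] at hgd
        simp only [Option.getD_some] at hgd
        rw [hgd, hhead, ht]
        simp
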